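-- pv_equiv track=rewrite | github.com/jmwerner/recipes | tests/conftest.py | convert_mixed_number_to_fraction
-- ===== SOURCE A (Python) =====
-- def convert_mixed_number_to_fraction(input_string):
--     splits = input_string.split(' ')
--     splits = [x for x in splits if x]
--     if len(splits) not in [1, 2]:
--         raise ValueError('Mixed number conversion failed due to improper form')
--     if len(splits) == 1:
--         inner_splits = splits[0].split('/')
--         inner_splits = [x for x in inner_splits if x]
--         if len(inner_splits) == 1:
--             return (int(inner_splits[0]), 1)
--         else:
--             return (int(inner_splits[0]), int(inner_splits[1]))
--     else:
--         splits_new = splits[1].split(' ')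
--         splits_new = [x for x in splits_new if x]
--         if len(splits_new) == 1:
--             inner_splits_new = splits_new[0].split('/')
--             inner_splits_new = [x for x in inner_splits_new if x]
--             if len(inner_splits_new) == 1:
--                 processed_touple = (int(inner_splits_new[0]), 1)
--             else:
--                 processed_touple = (int(inner_splits_new[0]), int(inner_splits_new[1]))
--         output_numerator = processed_touple[0] + int(splits[0]) * processed_touple[1]
--         return (output_numerator, processed_touple[1])
-- ===== SOURCE B (Python) =====
-- def convert_mixed_number_to_fraction(input_string):
--     # single left-to-right character scan (state machine), no str.split at all
--     tokens = []
--     cur = ''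
--     for ch in input_string + ' ':
--         if ch == ' ':
--             if cur:
--                 tokens.append(cur)
--                 cur = ''
--         else:
--             cur += ch
--     if len(tokens) not in (1, 2):
--         raise ValueError('Mixed number conversion failed due to improper form')
--     pieces = []
--     cur = ''
--     for ch in tokens[-1] + '/':
--         if ch == '/':
--             if cur:
--                 pieces.append(cur)
--                 cur = ''
--         else:
--             cur += ch
--     num = int(pieces[0])
--     den = int(pieces[1]) if len(pieces) > 1 else 1
--     whole = int(tokens[0]) * den if len(tokens) == 2 else 0
--     return (whole + num, den)
-- ===== Notes on version B (the rewrite author's own statement) =====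
-- stated objective: alternative
-- what changed: Replaces A's split/list-filter passes and duplicated two-branch fraction parsing with a single left-to-right character-scan state machine that builds tokens in one pass (and a second tiny scan for the slash-pieces of the last token), with the whole part folded in arithmetically.
import Mathlib
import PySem

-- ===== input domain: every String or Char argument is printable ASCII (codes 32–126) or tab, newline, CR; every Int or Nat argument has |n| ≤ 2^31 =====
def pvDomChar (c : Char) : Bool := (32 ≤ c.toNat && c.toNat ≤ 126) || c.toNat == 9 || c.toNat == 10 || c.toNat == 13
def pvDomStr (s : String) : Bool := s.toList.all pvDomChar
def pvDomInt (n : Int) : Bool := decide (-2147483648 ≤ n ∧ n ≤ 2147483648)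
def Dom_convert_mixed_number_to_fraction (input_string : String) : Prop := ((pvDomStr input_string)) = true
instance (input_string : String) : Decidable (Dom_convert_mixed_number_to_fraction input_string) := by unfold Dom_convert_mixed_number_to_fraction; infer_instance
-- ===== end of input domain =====

-- B replaces A's split/filter passes by a single left-to-right character-scan state machine
-- (objective: alternative decomposition); A and B agree on every input where A returns
-- (Pre_ excludes exactly A's ValueError/IndexError/ValueError-on-int raises).

-- ===== PORT A =====
-- literal transliteration of A; where the Python raises (len(splits) ∉ {1,2}: ValueError; empty
-- slash-split or int() failure: IndexError/ValueError) the port returns a junk default and Pre_ excludes the input.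
def convert_mixed_number_to_fraction (input_string : String) : Int × Int :=
  let splits := (PySem.Chars.splitOn input_string.toList [' ']).filter (fun x => !x.isEmpty)
  if splits.length = 1 then
    let inner_splits := (PySem.Chars.splitOn (splits.getD 0 []) ['/']).filter (fun x => !x.isEmpty)
    if inner_splits.length = 1 then
      ((PySem.Int.ofChars? (inner_splits.getD 0 [])).getD 0, 1)
    else
      ((PySem.Int.ofChars? (inner_splits.getD 0 [])).getD 0, (PySem.Int.ofChars? (inner_splits.getD 1 [])).getD 0)
  else if splits.length = 2 then
    let splits_new := (PySem.Chars.splitOn (splits.getD 1 []) [' ']).filter (fun x => !x.isEmpty)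
    let processed_touple :=
      if splits_new.length = 1 then
        let inner_splits_new := (PySem.Chars.splitOn (splits_new.getD 0 []) ['/']).filter (fun x => !x.isEmpty)
        if inner_splits_new.length = 1 then
          ((PySem.Int.ofChars? (inner_splits_new.getD 0 [])).getD 0, (1 : Int))
        else
          ((PySem.Int.ofChars? (inner_splits_new.getD 0 [])).getD 0, (PySem.Int.ofChars? (inner_splits_new.getD 1 [])).getD 0)
      else ((0 : Int), (0 : Int)) -- Python: NameError (unreachable: splits[1] contains no ' ')
    (processed_touple.1 + (PySem.Int.ofChars? (splits.getD 0 [])).getD 0 * processed_touple.2, processed_touple.2)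
  else (0, 0) -- Python: raise ValueError('Mixed number conversion failed due to improper form')

-- ===== PORT B =====
-- B's tokenizer: one fold over the characters (the Python for-loop over input + sep),
-- flushing the current token whenever the separator is seen.
def pvScanStep (sep : Char) (st : List (List Char) × List Char) (c : Char) : List (List Char) × List Char :=
  if c = sep then (if st.2 = [] then st else (st.1 ++ [st.2], [])) else (st.1, st.2 ++ [c])

def pvScan (sep : Char) (cs : List Char) : List (List Char) :=
  ((cs ++ [sep]).foldl (pvScanStep sep) ([], [])).1

def convert_mixed_number_to_fraction_alt (input_string : String) : Int × Int :=
  let tokens := pvScan ' ' input_string.toList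
  if tokens.length = 1 ∨ tokens.length = 2 then
    let pieces := pvScan '/' (PySem.List.pyGetD tokens (-1) [])
    let num := (PySem.Int.ofChars? (pieces.getD 0 [])).getD 0
    let den := if 1 < pieces.length then (PySem.Int.ofChars? (pieces.getD 1 [])).getD 0 else (1 : Int)
    let whole := if tokens.length = 2 then (PySem.Int.ofChars? (tokens.getD 0 [])).getD 0 * den else 0
    (whole + num, den)
  else (0, 0) -- Python: raise ValueError('Mixed number conversion failed due to improper form')

-- ===== PRECONDITION & SPEC =====
def pvParts (s : String) : List (List Char) :=
  (PySem.Chars.splitOn s.toList [' ']).filter (fun x => !x.isEmpty)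
def pvFrac (t : List Char) : List (List Char) :=
  (PySem.Chars.splitOn t ['/']).filter (fun x => !x.isEmpty)

-- Pre_ holds exactly when A returns: one or two space-separated tokens, the last token has a
-- nonempty slash-piece, and every consumed piece parses as a Python int.
def Pre_convert_mixed_number_to_fraction (input_string : String) : Prop :=
  ((pvParts input_string).length = 1 ∨
    ((pvParts input_string).length = 2 ∧
      (PySem.Int.ofChars? ((pvParts input_string).getD 0 [])).isSome = true)) ∧
  pvFrac ((pvParts input_string).getLastD []) ≠ [] ∧
  (PySem.Int.ofChars? ((pvFrac ((pvParts input_string).getLastD [])).getD 0 [])).isSome = true ∧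
  ((pvFrac ((pvParts input_string).getLastD [])).length = 1 ∨
    (PySem.Int.ofChars? ((pvFrac ((pvParts input_string).getLastD [])).getD 1 [])).isSome = true)
instance (input_string : String) : Decidable (Pre_convert_mixed_number_to_fraction input_string) := by
  unfold Pre_convert_mixed_number_to_fraction; infer_instance

def pvWitness_convert_mixed_number_to_fraction : String := "1 1/2"

def Spec_convert_mixed_number_to_fraction (input_string : String) (out : Int × Int) : Prop := out = convert_mixed_number_to_fraction_alt input_string
instance (input_string : String) (out : Int × Int) : Decidable (Spec_convert_mixed_number_to_fraction input_string out) := by unfold Spec_convert_mixed_number_to_fraction; infer_instance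

-- ===== CLAIM (what is proved, stated in full; the proofs are below) =====
def Claim_equal_convert_mixed_number_to_fraction : Prop := ∀ (input_string : String), Dom_convert_mixed_number_to_fraction input_string → Pre_convert_mixed_number_to_fraction input_string → Spec_convert_mixed_number_to_fraction input_string (convert_mixed_number_to_fraction input_string)

-- ===== LEMMAS AND PROOFS =====

-- reference tokenizer both sides are reduced to: the nonempty maximal sep-free pieces of the input
def wordsRec (sep : Char) : List Char → List Char → List (List Char)
  | [], cur => if cur = [] then [] else [cur]
  | c :: rest, cur =>
      if c = sep then (if cur = [] then wordsRec sep rest [] else cur :: wordsRec sep rest [])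
      else wordsRec sep rest (cur ++ [c])

-- B's fold computes wordsRec
lemma scan_fold (sep : Char) : ∀ (cs : List Char) (toks : List (List Char)) (cur : List Char),
    ((cs ++ [sep]).foldl (pvScanStep sep) (toks, cur)).1 = toks ++ wordsRec sep cs cur := by
  intro cs
  induction cs with
  | nil =>
    intro toks cur
    simp only [List.nil_append, List.foldl_cons, List.foldl_nil, pvScanStep, wordsRec]
    by_cases h : cur = [] <;> simp [h]
  | cons c rest ih =>
    intro toks cur
    simp only [List.cons_append, List.foldl_cons]
    by_cases hc : c = sep
    · subst hc
      simp only [pvScanStep]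
      by_cases h : cur = []
      · rw [if_pos h, ih]
        simp [wordsRec, h]
      · rw [if_neg h, ih]
        simp [wordsRec, h]
    · simp only [pvScanStep, if_neg hc]
      rw [ih]
      simp [wordsRec, hc]

lemma pvScan_eq (sep : Char) (cs : List Char) : pvScan sep cs = wordsRec sep cs [] := by
  rw [pvScan, scan_fold]; simp

-- A's split-then-filter computes wordsRec
lemma filter_go (sep : Char) : ∀ (l : List Char) (fuel : Nat) (cur : List Char) (acc : List (List Char)),
    l.length < fuel →
    (PySem.Chars.splitOn.go [sep] fuel l cur acc).filter (fun x => !x.isEmpty)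
      = acc.reverse.filter (fun x => !x.isEmpty) ++ wordsRec sep l cur.reverse := by
  intro l
  induction l with
  | nil =>
    intro fuel cur acc hf
    cases fuel with
    | zero => omega
    | succ f =>
      simp only [PySem.Chars.splitOn.go, wordsRec]
      by_cases h : cur.reverse = [] <;>
        simp [h, List.filter_append]
  | cons c rest ih =>
    intro fuel cur acc hf
    cases fuel with
    | zero => omega
    | succ f =>
      rw [PySem.Chars.splitOn.go]
      by_cases hc : c = sep
      · have hp : [sep].isPrefixOf (c :: rest) = true := by simp [List.isPrefixOf, hc]
        rw [if_pos hp]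
        simp only [List.length_singleton, List.drop_one, List.tail_cons]
        rw [ih f [] (cur.reverse :: acc) (by simp at hf ⊢; omega)]
        simp only [List.reverse_cons, List.filter_append, List.reverse_nil, wordsRec, hc]
        by_cases h : cur.reverse = []
        · simp [h]
        · obtain ⟨d, ds, hd⟩ := List.exists_cons_of_ne_nil h
          simp [hd]
      · have hp : [sep].isPrefixOf (c :: rest) = false := by
          simp [List.isPrefixOf]; exact fun h => (hc h.symm).elim
        rw [hp]
        simp only [Bool.false_eq_true, if_false]
        rw [ih f (c :: cur) acc (by simp at hf ⊢; omega)]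
        simp [wordsRec, hc]

lemma splitOn_filter_eq (sep : Char) (cs : List Char) :
    (PySem.Chars.splitOn cs [sep]).filter (fun x => !x.isEmpty) = wordsRec sep cs [] := by
  rw [PySem.Chars.splitOn, filter_go sep cs (cs.length + 1) [] [] (Nat.lt_succ_self _)]
  simp

-- tokens contain no separator and are nonempty
lemma wordsRec_mem (sep : Char) : ∀ (cs cur : List Char), sep ∉ cur →
    ∀ y ∈ wordsRec sep cs cur, sep ∉ y ∧ y ≠ [] := by
  intro cs
  induction cs with
  | nil =>
    intro cur hc y hy
    simp only [wordsRec] at hy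
    by_cases h : cur = []
    · simp [h] at hy
    · simp [h] at hy; exact hy ▸ ⟨hc, h⟩
  | cons c rest ih =>
    intro cur hc y hy
    simp only [wordsRec] at hy
    by_cases hcs : c = sep
    · rw [if_pos hcs] at hy
      by_cases h : cur = []
      · rw [if_pos h] at hy; exact ih [] (by simp) y hy
      · rw [if_neg h] at hy
        rcases List.mem_cons.mp hy with h' | h'
        · exact h' ▸ ⟨hc, h⟩
        · exact ih [] (by simp) y h'
    · rw [if_neg hcs] at hy
      exact ih (cur ++ [c]) (by
        intro h; rcases List.mem_append.mp h with h | h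
        · exact hc h
        · simp at h; exact hcs h.symm) y hy

-- a sep-free nonempty token tokenizes to itself
lemma wordsRec_free (sep : Char) : ∀ (b cur : List Char), sep ∉ b →
    wordsRec sep b cur = if cur ++ b = [] then [] else [cur ++ b] := by
  intro b
  induction b with
  | nil => intro cur _; simp [wordsRec]
  | cons c rest ih =>
    intro cur hm
    have hc : c ≠ sep := fun h => hm (h ▸ List.mem_cons_self ..)
    simp only [wordsRec, if_neg hc]
    rw [ih (cur ++ [c]) (fun h => hm (List.mem_cons_of_mem _ h))]
    simp

lemma pvParts_eq (s : String) : pvParts s = wordsRec ' ' s.toList [] :=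
  splitOn_filter_eq ' ' s.toList

lemma pvFrac_eq (t : List Char) : pvFrac t = wordsRec '/' t [] :=
  splitOn_filter_eq '/' t

-- ===== VERDICT (by name: the statement is the Claim_ definition above) =====
theorem convert_mixed_number_to_fraction_spec : Claim_equal_convert_mixed_number_to_fraction := by
  intro s _ hpre
  unfold Spec_convert_mixed_number_to_fraction
  unfold Pre_convert_mixed_number_to_fraction at hpre
  obtain ⟨hlen, hne, -, -⟩ := hpre
  rw [pvParts_eq] at hlen
  rw [pvParts_eq, pvFrac_eq] at hne
  unfold convert_mixed_number_to_fraction convert_mixed_number_to_fraction_alt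
  simp only [splitOn_filter_eq, pvScan_eq]
  set T := wordsRec ' ' s.toList [] with hT
  rcases hlen with h1 | ⟨h2, -⟩
  · obtain ⟨a, ha⟩ := List.length_eq_one_iff.mp h1
    rw [ha] at hne ⊢
    simp only [List.getLastD_cons, List.getLastD_nil] at hne
    simp only [List.length_singleton, List.getD, List.getElem?_cons_zero, Option.getD_some,
      PySem.List.pyGetD, PySem.List.pyGet?, PySem.List.pyIdx?]
    norm_num
    set F := wordsRec '/' a [] with hF
    have hFpos : 0 < F.length := List.length_pos_iff.mpr hne
    by_cases hF1 : F.length = 1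
    · simp [hF1]
    · have hFgt : 1 < F.length := by omega
      simp [hF1, hFgt, ← hF, List.getD]
  · obtain ⟨a, b, hab⟩ := List.length_eq_two.mp h2
    have hbmem : b ∈ T := by rw [hab]; simp
    obtain ⟨hbfree, hbne⟩ := wordsRec_mem ' ' s.toList [] (by simp) b (hT ▸ hbmem)
    have hsn : wordsRec ' ' b [] = [b] := by rw [wordsRec_free ' ' b [] hbfree]; simp [hbne]
    rw [hab] at hne ⊢
    simp only [List.length_cons, List.length_nil, List.getD, List.getLastD,
      List.getElem?_cons_zero, List.getElem?_cons_succ, Option.getD_some] at hne ⊢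
    simp only [List.getLast] at hne
    simp only [PySem.List.pyGetD, PySem.List.pyGet?, PySem.List.pyIdx?]
    norm_num
    rw [hsn]
    simp only [List.length_singleton, List.getD, List.getElem?_cons_zero, Option.getD_some]
    set F := wordsRec '/' b [] with hF
    have hFpos : 0 < F.length := List.length_pos_iff.mpr hne
    by_cases hF1 : F.length = 1
    · rw [if_pos hF1, if_neg (by omega : ¬ 1 < F.length)]
      simp [mul_one]
      constructor
      · ring
      · intro h'
        omega
    · have hFgt : 1 < F.length := by omega
      rw [if_neg hF1, if_pos hFgt]
      simp [List.getD]
      refine ⟨by ring, fun h' => ?_⟩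
      omega
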